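-- pv_equiv track=rewrite | github.com/OrderLab/TrainCheck | traincheck/invariant/lead_relation.py | get_func_A_B_events
-- ===== SOURCE A (Python) =====
-- from typing import Any, Dict, Iterable, List, Set, Tuple
--
-- def get_func_A_B_events(events_list: List[dict[str, Any]], func_A: str, func_B: str):
--     events_A = [event for event in events_list if event["function"] == func_A]
--     events_A_pre = [
--         event for event in events_A if event["type"] == "function_call (pre)"
--     ]
--     events_A_post = [
--         event
--         for event in events_A
--         if event["type"] == "function_call (post)"
--         or event["type"] == "function_call (post) (exception)"
--     ]
--     events_B = [event for event in events_list if event["function"] == func_B]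
--     events_B_pre = [
--         event for event in events_B if event["type"] == "function_call (pre)"
--     ]
--     events_B_post = [
--         event
--         for event in events_B
--         if event["type"] == "function_call (post)"
--         or event["type"] == "function_call (post) (exception)"
--     ]
--     return (events_A_pre, events_A_post, events_B_pre, events_B_post)
-- ===== SOURCE B (Python) =====
-- def get_func_A_B_events(events_list, func_A, func_B):
--     events_A_pre, events_A_post, events_B_pre, events_B_post = [], [], [], []
--     for event in events_list:
--         if event["function"] == func_A:
--             t = event["type"]
--             if t == "function_call (pre)":
--                 events_A_pre.append(event)
--             elif t == "function_call (post)" or t == "function_call (post) (exception)":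
--                 events_A_post.append(event)
--         if event["function"] == func_B:
--             t = event["type"]
--             if t == "function_call (pre)":
--                 events_B_pre.append(event)
--             elif t == "function_call (post)" or t == "function_call (post) (exception)":
--                 events_B_post.append(event)
--     return (events_A_pre, events_A_post, events_B_pre, events_B_post)
-- ===== Notes on version B (the rewrite author's own statement) =====
-- stated objective: alternative
-- what changed: Replaces six list comprehensions (two name-filter scans plus four filtered rescans) by a single pass over events_list that appends each event directly into the right of four accumulator buckets, testing func_A and func_B with independent ifs so func_A == func_B still fills both sides.
import Mathlib
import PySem

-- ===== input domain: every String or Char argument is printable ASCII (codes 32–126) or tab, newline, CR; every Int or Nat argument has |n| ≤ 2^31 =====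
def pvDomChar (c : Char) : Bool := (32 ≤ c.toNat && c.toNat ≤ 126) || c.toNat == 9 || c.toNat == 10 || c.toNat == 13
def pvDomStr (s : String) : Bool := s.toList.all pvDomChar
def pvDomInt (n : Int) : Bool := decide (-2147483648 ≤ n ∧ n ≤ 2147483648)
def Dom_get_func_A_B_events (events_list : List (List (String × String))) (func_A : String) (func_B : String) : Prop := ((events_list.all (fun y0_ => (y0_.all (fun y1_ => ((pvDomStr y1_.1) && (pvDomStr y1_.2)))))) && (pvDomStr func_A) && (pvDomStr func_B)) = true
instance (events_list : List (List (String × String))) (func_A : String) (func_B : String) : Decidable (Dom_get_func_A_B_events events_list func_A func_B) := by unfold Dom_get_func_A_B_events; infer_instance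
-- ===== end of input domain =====

-- ===== PORT A =====
-- B is one fused pass with four accumulators instead of A's six comprehensions; return-value equivalence proved on Pre_ (inputs where Python A raises no KeyError).
-- event["k"]: first-match association-list lookup (KeyError = none, excluded by Pre_)
def pvKey (e : List (String × String)) (k : String) : Option String :=
  List.lookup k e

def get_func_A_B_events (events_list : List (List (String × String))) (func_A : String) (func_B : String) : (List (List (String × String))) × (List (List (String × String))) × (List (List (String × String))) × (List (List (String × String))) :=
  let events_A := events_list.filter (fun e => pvKey e "function" == some func_A)
  let events_A_pre := events_A.filter (fun e => pvKey e "type" == some "function_call (pre)")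
  let events_A_post := events_A.filter (fun e =>
    pvKey e "type" == some "function_call (post)" || pvKey e "type" == some "function_call (post) (exception)")
  let events_B := events_list.filter (fun e => pvKey e "function" == some func_B)
  let events_B_pre := events_B.filter (fun e => pvKey e "type" == some "function_call (pre)")
  let events_B_post := events_B.filter (fun e =>
    pvKey e "type" == some "function_call (post)" || pvKey e "type" == some "function_call (post) (exception)")
  (events_A_pre, events_A_post, events_B_pre, events_B_post)

-- ===== PORT B =====
-- one step of B's loop body: route one event into the four buckets (independent ifs for A and B)
def pvStep (func_A func_B : String)
    (acc : (List (List (String × String))) × (List (List (String × String))) × (List (List (String × String))) × (List (List (String × String))))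
    (e : List (String × String)) :
    (List (List (String × String))) × (List (List (String × String))) × (List (List (String × String))) × (List (List (String × String))) :=
  let (ap, aq, bp, bq) := acc
  let (ap, aq) :=
    if pvKey e "function" == some func_A then
      let t := pvKey e "type"
      if t == some "function_call (pre)" then (ap ++ [e], aq)
      else if t == some "function_call (post)" || t == some "function_call (post) (exception)" then (ap, aq ++ [e])
      else (ap, aq)
    else (ap, aq)
  let (bp, bq) :=
    if pvKey e "function" == some func_B then
      let t := pvKey e "type"
      if t == some "function_call (pre)" then (bp ++ [e], bq)
      else if t == some "function_call (post)" || t == some "function_call (post) (exception)" then (bp, bq ++ [e])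
      else (bp, bq)
    else (bp, bq)
  (ap, aq, bp, bq)

def get_func_A_B_events_alt (events_list : List (List (String × String))) (func_A : String) (func_B : String) : (List (List (String × String))) × (List (List (String × String))) × (List (List (String × String))) × (List (List (String × String))) :=
  events_list.foldl (pvStep func_A func_B) ([], [], [], [])

-- ===== PRECONDITION & SPEC =====
-- Pre_ excludes exactly the inputs where Python A raises KeyError: an event without a "function"
-- key, or an event matching func_A or func_B without a "type" key.
def Pre_get_func_A_B_events (events_list : List (List (String × String))) (func_A : String) (func_B : String) : Prop :=
  ∀ e ∈ events_list, (pvKey e "function").isSome ∧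
    ((pvKey e "function" = some func_A ∨ pvKey e "function" = some func_B) → (pvKey e "type").isSome)
instance (events_list : List (List (String × String))) (func_A : String) (func_B : String) : Decidable (Pre_get_func_A_B_events events_list func_A func_B) := by unfold Pre_get_func_A_B_events; infer_instance

def pvWitness_get_func_A_B_events : (List (List (String × String))) × String × String :=
  ([[("function", "f"), ("type", "function_call (pre)")], [("function", "g"), ("type", "function_call (post)")]], "f", "g")

def Spec_get_func_A_B_events (events_list : List (List (String × String))) (func_A : String) (func_B : String) (out : (List (List (String × String))) × (List (List (String × String))) × (List (List (String × String))) × (List (List (String × String)))) : Prop := out = get_func_A_B_events_alt events_list func_A func_B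
instance (events_list : List (List (String × String))) (func_A : String) (func_B : String) (out : (List (List (String × String))) × (List (List (String × String))) × (List (List (String × String))) × (List (List (String × String)))) : Decidable (Spec_get_func_A_B_events events_list func_A func_B out) := by unfold Spec_get_func_A_B_events; infer_instance

-- ===== CLAIM (what is proved, stated in full; the proofs are below) =====
def Claim_equal_get_func_A_B_events : Prop := ∀ (events_list : List (List (String × String))) (func_A : String) (func_B : String), Dom_get_func_A_B_events events_list func_A func_B → Pre_get_func_A_B_events events_list func_A func_B → Spec_get_func_A_B_events events_list func_A func_B (get_func_A_B_events events_list func_A func_B)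

-- ===== LEMMAS AND PROOFS =====
theorem pvFold_char (func_A func_B : String) (l : List (List (String × String)))
    (ap aq bp bq : List (List (String × String))) :
    l.foldl (pvStep func_A func_B) (ap, aq, bp, bq) =
      (ap ++ (l.filter (fun e => pvKey e "function" == some func_A)).filter
              (fun e => pvKey e "type" == some "function_call (pre)"),
       aq ++ (l.filter (fun e => pvKey e "function" == some func_A)).filter
              (fun e => pvKey e "type" == some "function_call (post)" || pvKey e "type" == some "function_call (post) (exception)"),
       bp ++ (l.filter (fun e => pvKey e "function" == some func_B)).filter
              (fun e => pvKey e "type" == some "function_call (pre)"),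
       bq ++ (l.filter (fun e => pvKey e "function" == some func_B)).filter
              (fun e => pvKey e "type" == some "function_call (post)" || pvKey e "type" == some "function_call (post) (exception)")) := by
  induction l generalizing ap aq bp bq with
  | nil => simp
  | cons e l ih =>
    simp only [List.foldl_cons, List.filter_cons]
    rw [pvStep]
    by_cases hA : (pvKey e "function" == some func_A) = true <;>
      by_cases hB : (pvKey e "function" == some func_B) = true <;>
        simp only [hA, hB, if_true, if_false, Bool.false_eq_true, ite_false, ite_true] <;>
        by_cases h1 : (pvKey e "type" == some "function_call (pre)") = true <;>
          by_cases h2 : (pvKey e "type" == some "function_call (post)" || pvKey e "type" == some "function_call (post) (exception)") = true <;>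
            simp_all [ih]

-- ===== VERDICT (by name: the statement is the Claim_ definition above) =====
theorem get_func_A_B_events_spec : Claim_equal_get_func_A_B_events := by
  intro l a b _ _
  unfold Spec_get_func_A_B_events get_func_A_B_events get_func_A_B_events_alt
  rw [pvFold_char]
  simp
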